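-- pv_equiv track=rewrite | github.com/vishnusangli/sp_blinks | blinkit/blinkit/data.py | complement_ends
-- ===== SOURCE A (Python) =====
-- def complement_ends(arr: list, exclude_points: list, window_threshold: int = 20):
--     """
--     Output ranges of given array that does not exist within excluded points. If
--     valid point exists at most `window_threshold` distance from the previous range,
--     it is included in the previous range. \n
--
--     When excluding points with low gradients, this method outputs ranges of
--     high variance, thereby providing potential blinks.
--     """
--     copy_exclude_points = exclude_points.copy()
--     lims = []
--     recent_inclusion = -1
--     for i in range(len(arr)):
--         if i != copy_exclude_points[0]:
--             if len(lims) == 0: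
--                 lims.append([i])
--             elif i - recent_inclusion > window_threshold:
--                 lims[-1].append(recent_inclusion)
--                 lims.append([i])
--             recent_inclusion = i
--         else:
--             copy_exclude_points = copy_exclude_points[1:]
--     if len(lims) > 0 and len(lims[-1]) == 1:
--         lims[-1].append(i)
--     return lims
-- ===== SOURCE B (Python) =====
-- def complement_ends(arr: list, exclude_points: list, window_threshold: int = 20):
--     """
--     Ranges of indices of arr outside the excluded points.  A valid point at most
--     window_threshold away from the previous valid point extends the current
--     range; a larger gap closes it and starts a new one.
--     """
--     # Pass 1: collect the valid indices, consuming excluded indices in order.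
--     remaining = list(exclude_points)
--     valids = []
--     for i in range(len(arr)):
--         if remaining and i == remaining[0]:
--             remaining = remaining[1:]
--         else:
--             valids.append(i)
--     # Pass 2: merge consecutive valid indices into [start, end] ranges.
--     lims = []
--     start = prev = None
--     for v in valids:
--         if prev is None:
--             start = v
--         elif v - prev > window_threshold:
--             lims.append([start, prev])
--             start = v
--         prev = v
--     if prev is not None:
--         lims.append([start, prev])
--     return lims
-- ===== Notes on version B (the rewrite author's own statement) =====
-- stated objective: alternative
-- what changed: A's single stateful loop threading (copy, lims, recent_inclusion) with in-place mutation of lims[-1] and a post-loop fixup is replaced by two clean passes: collect the valid indices, then merge them into [start, end] ranges emitted fully formed.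
-- intended difference: When the array's last index is itself excluded (greedily consumed from exclude_points) but some valid index remains, A closes the final range at len(arr)-1 -- an excluded point -- while B closes it at the last valid index, the same rule it and A use for every interior range, which is the intended value. — e.g. on complement_ends([5, 6], [1], 20): A returns [[0, 1]], B returns [[0, 0]]
import Mathlib
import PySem

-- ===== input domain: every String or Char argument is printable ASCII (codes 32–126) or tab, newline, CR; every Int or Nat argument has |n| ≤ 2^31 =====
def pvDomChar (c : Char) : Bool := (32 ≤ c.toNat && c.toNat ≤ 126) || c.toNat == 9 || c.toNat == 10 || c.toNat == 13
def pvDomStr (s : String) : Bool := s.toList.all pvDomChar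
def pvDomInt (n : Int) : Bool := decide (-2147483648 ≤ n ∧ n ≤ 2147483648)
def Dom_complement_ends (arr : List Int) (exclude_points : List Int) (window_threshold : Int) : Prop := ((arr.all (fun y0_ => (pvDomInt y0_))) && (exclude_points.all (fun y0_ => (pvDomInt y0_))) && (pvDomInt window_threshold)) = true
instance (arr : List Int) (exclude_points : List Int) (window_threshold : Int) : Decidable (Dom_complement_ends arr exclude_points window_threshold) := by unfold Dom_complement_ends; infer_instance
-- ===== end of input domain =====

-- B replaces A's single stateful loop by two passes (collect valid indices, then
-- merge into ranges); same cost ("alternative"); B closes the last range at the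
-- last valid index (D_ below) and returns where A's IndexError is excluded by Pre_.

-- ===== PORT A =====
-- lims[-1].append(v)  (A only calls it with lims nonempty)
def pvAppendLast : List (List Int) → Int → List (List Int)
  | [], _ => []
  | [x], v => [x ++ [v]]
  | x :: y :: xs, v => x :: pvAppendLast (y :: xs) v

-- one iteration of A's for-loop; state = (copy_exclude_points, lims, recent_inclusion);
-- none = the IndexError Python raises on copy_exclude_points[0] with an empty list
def pvStepA (wt : Int) (st : Option (List Int × List (List Int) × Int)) (i : Int) :
    Option (List Int × List (List Int) × Int) :=
  match st with
  | none => none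
  | some (copy, lims, rcnt) =>
    match copy with
    | [] => none
    | c0 :: rest =>
      if i ≠ c0 then
        if lims = [] then some (copy, lims ++ [[i]], i)
        else if i - rcnt > wt then some (copy, pvAppendLast lims rcnt ++ [[i]], i)
        else some (copy, lims, i)
      else some (rest, lims, rcnt)

def complement_ends (arr : List Int) (exclude_points : List Int) (window_threshold : Int) : List (List Int) :=
  match (PySem.List.pyRange 0 (arr.length : Int) 1).foldl (pvStepA window_threshold) (some (exclude_points, [], -1)) with
  | none => []  -- unreachable under Pre_ (Python raises IndexError)
  | some (_, lims, _) =>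
    -- if len(lims) > 0 and len(lims[-1]) == 1: lims[-1].append(i)   (i = len(arr)-1 here)
    match lims.getLast? with
    | none => lims
    | some last => if last.length = 1 then pvAppendLast lims ((arr.length : Int) - 1) else lims

-- ===== PORT B =====
-- pass 1, one iteration; state = (remaining, valids);
-- 'if remaining and i == remaining[0]: remaining = remaining[1:] else: valids.append(i)'
def pvStepB1 (st : List Int × List Int) (i : Int) : List Int × List Int :=
  match st with
  | (c0 :: rest, vs) => if i = c0 then (rest, vs) else (c0 :: rest, vs ++ [i])
  | ([], vs) => ([], vs ++ [i])

-- pass 2 after the first valid index set start = prev = that index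
def pvGo (wt : Int) : List Int → Int → Int → List (List Int)
  | [], start, prev => [[start, prev]]
  | v :: rest, start, prev =>
    if v - prev > wt then [start, prev] :: pvGo wt rest v v
    else pvGo wt rest start v

def pvPass2 (wt : Int) : List Int → List (List Int)
  | [] => []
  | v :: rest => pvGo wt rest v v

def complement_ends_alt (arr : List Int) (exclude_points : List Int) (window_threshold : Int) : List (List Int) :=
  pvPass2 window_threshold
    ((PySem.List.pyRange 0 (arr.length : Int) 1).foldl pvStepB1 (exclude_points, [])).2

-- ===== PRECONDITION & SPEC =====
-- A raises IndexError exactly when exclude_points gets fully consumed before the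
-- last loop iteration, i.e. when it is strictly increasing with all elements in
-- [0, len(arr)-2] (incl. exclude_points = [] with arr nonempty); Pre_ excludes that.
def Pre_complement_ends (arr : List Int) (exclude_points : List Int) (window_threshold : Int) : Prop :=
  arr = [] ∨ ¬ (List.Pairwise (· < ·) exclude_points ∧ ∀ e ∈ exclude_points, 0 ≤ e ∧ e < (arr.length : Int) - 1)
instance (arr : List Int) (exclude_points : List Int) (window_threshold : Int) : Decidable (Pre_complement_ends arr exclude_points window_threshold) := by unfold Pre_complement_ends; infer_instance

def pvWitness_complement_ends : List Int × List Int × Int := ([5, 6, 7], [7], 20)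

-- the indices A's loop actually excludes: the greedy strictly increasing prefix of
-- exclude_points whose elements lie below n (a closed-form property of the input)
def pvConsumed (n : Int) : List Int → Int → List Int
  | [], _ => []
  | e :: rest, last => if last < e ∧ e < n then e :: pvConsumed n rest e else []

-- When the array's last index is itself excluded (greedily consumed from
-- exclude_points) but some valid index remains, A closes the final range at
-- len(arr)-1 — an excluded point — while B closes it at the last valid index, the
-- same rule both use for every interior range, which is the intended value.
def D_complement_ends (arr : List Int) (exclude_points : List Int) (window_threshold : Int) : Prop :=
  ((arr.length : Int) - 1) ∈ pvConsumed (arr.length : Int) exclude_points (-1) ∧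
  (pvConsumed (arr.length : Int) exclude_points (-1)).length < arr.length
instance (arr : List Int) (exclude_points : List Int) (window_threshold : Int) : Decidable (D_complement_ends arr exclude_points window_threshold) := by unfold D_complement_ends; infer_instance

def Spec_complement_ends (arr : List Int) (exclude_points : List Int) (window_threshold : Int) (out : List (List Int)) : Prop := ¬ D_complement_ends arr exclude_points window_threshold → out = complement_ends_alt arr exclude_points window_threshold
instance (arr : List Int) (exclude_points : List Int) (window_threshold : Int) (out : List (List Int)) : Decidable (Spec_complement_ends arr exclude_points window_threshold out) := by unfold Spec_complement_ends; infer_instance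

def pvDiffWitness_complement_ends : List Int × List Int × Int := ([5, 6], [1], 20)
def pvDiffWitnessOut_complement_ends : (List (List Int)) × (List (List Int)) := ([[0, 1]], [[0, 0]])

-- ===== CLAIM (what is proved, stated in full; the proofs are below) =====
def Claim_unchanged_complement_ends : Prop := ∀ (arr : List Int) (exclude_points : List Int) (window_threshold : Int), Dom_complement_ends arr exclude_points window_threshold → Pre_complement_ends arr exclude_points window_threshold → Spec_complement_ends arr exclude_points window_threshold (complement_ends arr exclude_points window_threshold)
def Claim_changed_complement_ends : Prop := Dom_complement_ends (pvDiffWitness_complement_ends.1) (pvDiffWitness_complement_ends.2.1) (pvDiffWitness_complement_ends.2.2) ∧ Pre_complement_ends (pvDiffWitness_complement_ends.1) (pvDiffWitness_complement_ends.2.1) (pvDiffWitness_complement_ends.2.2) ∧ D_complement_ends (pvDiffWitness_complement_ends.1) (pvDiffWitness_complement_ends.2.1) (pvDiffWitness_complement_ends.2.2) ∧ complement_ends (pvDiffWitness_complement_ends.1) (pvDiffWitness_complement_ends.2.1) (pvDiffWitness_complement_ends.2.2) = pvDiffWitnessOut_complement_ends.1 ∧ complement_ends_alt (pvDiffWitness_complement_ends.1)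 (pvDiffWitness_complement_ends.2.1) (pvDiffWitness_complement_ends.2.2) = pvDiffWitnessOut_complement_ends.2 ∧ pvDiffWitnessOut_complement_ends.1 ≠ pvDiffWitnessOut_complement_ends.2
def Claim_exact_complement_ends : Prop := ∀ (arr : List Int) (exclude_points : List Int) (window_threshold : Int), Dom_complement_ends arr exclude_points window_threshold → Pre_complement_ends arr exclude_points window_threshold → D_complement_ends arr exclude_points window_threshold → complement_ends arr exclude_points window_threshold ≠ complement_ends_alt arr exclude_points window_threshold

-- ===== LEMMAS AND PROOFS =====

theorem pvAppendLast_concat (l : List (List Int)) (x : List Int) (v : Int) :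
    pvAppendLast (l ++ [x]) v = l ++ [x ++ [v]] := by
  induction l with
  | nil => rfl
  | cons a l ih =>
    cases l with
    | nil => rfl
    | cons b t => simpa [pvAppendLast] using ih

-- elements of the greedy consumed prefix exceed the running value and stay below n
theorem pvConsumed_mem_bounds (n : Int) (rem : List Int) : ∀ (last x : Int),
    x ∈ pvConsumed n rem last → last < x ∧ x < n := by
  induction rem with
  | nil => intro last x h; simp [pvConsumed] at h
  | cons e rest ih =>
    intro last x h
    by_cases hc : last < e ∧ e < n
    · rw [pvConsumed, if_pos hc] at h
      rcases List.mem_cons.mp h with rfl | h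
      · exact hc
      · exact ⟨lt_trans hc.1 (ih e x h).1, (ih e x h).2⟩
    · rw [pvConsumed, if_neg hc] at h; simp at h

theorem pvConsumed_pairwise (n : Int) (rem : List Int) : ∀ (last : Int),
    (pvConsumed n rem last).Pairwise (· < ·) := by
  induction rem with
  | nil => intro last; simp [pvConsumed]
  | cons e rest ih =>
    intro last
    by_cases hc : last < e ∧ e < n
    · rw [pvConsumed, if_pos hc]
      exact List.Pairwise.cons (fun x hx => (pvConsumed_mem_bounds n rest e x hx).1) (ih e)
    · rw [pvConsumed, if_neg hc]; simp

theorem pvConsumed_shift (n a : Int) (rem : List Int) (h : rem.head? ≠ some a) :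
    pvConsumed n rem (a - 1) = pvConsumed n rem a := by
  cases rem with
  | nil => rfl
  | cons e rest =>
    have hne : e ≠ a := by simpa [eq_comm] using h
    by_cases hc : a < e ∧ e < n
    · rw [pvConsumed, pvConsumed, if_pos ⟨by omega, hc.2⟩, if_pos hc]
    · rw [pvConsumed, pvConsumed, if_neg (by omega), if_neg hc]

theorem pvConsumed_nil_of_le (n a : Int) (rem : List Int) (h : n ≤ a) :
    pvConsumed n rem (a - 1) = [] := by
  cases rem with
  | nil => rfl
  | cons e rest => rw [pvConsumed, if_neg (by omega)]

theorem pvFilterShift (n a : Int) (C : List Int) :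
    (PySem.List.pyRange (a + 1) n 1).filter (fun i => decide (i ∉ a :: C))
      = (PySem.List.pyRange (a + 1) n 1).filter (fun i => decide (i ∉ C)) := by
  refine List.filter_congr ?_
  intro x hx
  have hx1 : a + 1 ≤ x := (PySem.List.mem_pyRange_one.mp hx).1
  have hxa : x ≠ a := by omega
  simp [hxa]

-- pass 1 characterization: the collected valids are the indices of [a, n) outside
-- the greedy consumed prefix of the remaining exclude list
theorem pvFoldB_char (wt : Int) : ∀ (k : Nat) (n a : Int), n - a ≤ (k : Int) →
    ∀ (rem vs : List Int),
    ((PySem.List.pyRange a n 1).foldl pvStepB1 (rem, vs)).2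
      = vs ++ (PySem.List.pyRange a n 1).filter
          (fun i => decide (i ∉ pvConsumed n rem (a - 1))) := by
  intro k
  induction k with
  | zero =>
    intro n a hk rem vs
    rw [PySem.List.pyRange_one_eq_nil (by omega)]
    simp
  | succ k ih =>
    intro n a hk rem vs
    by_cases han : a < n
    · rw [PySem.List.pyRange_one_cons han]
      match rem with
      | [] =>
        rw [List.foldl_cons, show pvStepB1 ([], vs) a = ([], vs ++ [a]) from rfl,
          ih n (a + 1) (by omega) [] (vs ++ [a])]
        have h0 : ∀ last, pvConsumed n ([] : List Int) last = [] := fun _ => rfl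
        simp [h0, List.filter_cons]
      | c0 :: rest =>
        by_cases hic : a = c0
        · subst hic
          have hC : pvConsumed n (a :: rest) (a - 1)
              = a :: pvConsumed n rest a := by
            rw [pvConsumed, if_pos ⟨by omega, han⟩]
          have ha1 : a + 1 - 1 = a := by omega
          rw [List.foldl_cons, show pvStepB1 (a :: rest, vs) a = (rest, vs) by
                simp [pvStepB1],
              ih n (a + 1) (by omega) rest vs, ha1, hC]
          have hhead : decide (a ∉ a :: pvConsumed n rest a) = false := by simp
          rw [List.filter_cons]
          simp only [hhead, Bool.false_eq_true, if_false]
          congr 1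
          exact (pvFilterShift n a (pvConsumed n rest a)).symm
        · have hC : pvConsumed n (c0 :: rest) (a - 1)
              = pvConsumed n (c0 :: rest) a :=
            pvConsumed_shift n a (c0 :: rest) (by simpa [eq_comm] using hic)
          have hanot : a ∉ pvConsumed n (c0 :: rest) a := by
            intro h; exact absurd (pvConsumed_mem_bounds n (c0 :: rest) a a h).1 (lt_irrefl a)
          have ha1 : a + 1 - 1 = a := by omega
          rw [List.foldl_cons, show pvStepB1 (c0 :: rest, vs) a = (c0 :: rest, vs ++ [a]) by
                simp [pvStepB1, hic],
              ih n (a + 1) (by omega) (c0 :: rest) (vs ++ [a]), ha1, hC]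
          rw [List.filter_cons]
          simp only [hanot, not_false_iff, decide_true, if_true]
          simp
    · rw [PySem.List.pyRange_one_eq_nil (by omega)]
      simp

-- if the filtered complement of [a, n) is empty, the consumed prefix is all of [a, n)
theorem pvFilterNil : ∀ (k : Nat) (n a : Int), n - a ≤ (k : Int) → ∀ (rem : List Int),
    (PySem.List.pyRange a n 1).filter (fun i => decide (i ∉ pvConsumed n rem (a - 1))) = [] →
    pvConsumed n rem (a - 1) = PySem.List.pyRange a n 1 := by
  intro k
  induction k with
  | zero =>
    intro n a hk rem _
    rw [PySem.List.pyRange_one_eq_nil (by omega)]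
    exact pvConsumed_nil_of_le n a rem (by omega)
  | succ k ih =>
    intro n a hk rem h
    by_cases han : a < n
    · rw [PySem.List.pyRange_one_cons han] at h ⊢
      cases rem with
      | nil =>
        have h0 : pvConsumed n ([] : List Int) (a - 1) = [] := rfl
        rw [h0, List.filter_cons] at h
        simp at h
      | cons c0 rest =>
        by_cases hic : a = c0
        · subst hic
          have hC : pvConsumed n (a :: rest) (a - 1)
              = a :: pvConsumed n rest a := by
            rw [pvConsumed, if_pos ⟨by omega, han⟩]
          have ha1 : a + 1 - 1 = a := by omega
          have hhead : decide (a ∉ a :: pvConsumed n rest a) = false := by simp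
          rw [hC, List.filter_cons] at h
          simp only [hhead, Bool.false_eq_true, if_false] at h
          rw [pvFilterShift] at h
          have := ih n (a + 1) (by omega) rest (by rw [ha1]; exact h)
          rw [ha1] at this
          rw [hC, this]
        · have hC : pvConsumed n (c0 :: rest) (a - 1)
              = pvConsumed n (c0 :: rest) a :=
            pvConsumed_shift n a (c0 :: rest) (by simpa [eq_comm] using hic)
          have hanot : a ∉ pvConsumed n (c0 :: rest) a := by
            intro hm; exact absurd (pvConsumed_mem_bounds n (c0 :: rest) a a hm).1 (lt_irrefl a)
          rw [hC, List.filter_cons] at h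
          simp [hanot] at h
    · rw [PySem.List.pyRange_one_eq_nil (by omega)]
      exact pvConsumed_nil_of_le n a rem (by omega)

-- the A-loop step on a valid index, phrased on (lims, recent_inclusion)
def pvShapeStep (wt : Int) (st : List (List Int) × Int) (v : Int) : List (List Int) × Int :=
  (if st.1 = [] then st.1 ++ [[v]]
   else if v - st.2 > wt then pvAppendLast st.1 st.2 ++ [[v]]
   else st.1, v)

theorem pvStepA_valid (wt i c0 : Int) (rest : List Int) (st : List (List Int) × Int)
    (h : i ≠ c0) :
    pvStepA wt (some (c0 :: rest, st)) i = some (c0 :: rest, pvShapeStep wt st i) := by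
  obtain ⟨lims, rcnt⟩ := st
  simp only [pvStepA, pvShapeStep, if_pos h]
  split_ifs <;> rfl

theorem pvStepA_skip (wt c0 : Int) (rest : List Int) (st : List (List Int) × Int) :
    pvStepA wt (some (c0 :: rest, st)) c0 = some (rest, st) := by
  obtain ⟨lims, rcnt⟩ := st
  simp [pvStepA]

theorem pvFoldA_none (wt : Int) (l : List Int) :
    List.foldl (pvStepA wt) none l = none := by
  induction l with
  | nil => rfl
  | cons a l ih => simpa [pvStepA] using ih

-- loop fission: when A's fold returns, its (lims, recent) state is B's valids
-- folded through pvShapeStep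
theorem pvFissionA (wt : Int) (l : List Int) : ∀ (rem vs : List Int)
    (p : List Int × List (List Int) × Int),
    List.foldl (pvStepA wt) (some (rem, List.foldl (pvShapeStep wt) ([], -1) vs)) l = some p →
    p.2 = List.foldl (pvShapeStep wt) ([], -1) ((l.foldl pvStepB1 (rem, vs)).2) := by
  induction l with
  | nil =>
    intro rem vs p hp
    simp only [List.foldl_nil] at hp ⊢
    exact (congrArg Prod.snd (Option.some.inj hp)).symm ▸ rfl
  | cons i l ih =>
    intro rem vs p hp
    cases rem with
    | nil =>
      rw [List.foldl_cons, show pvStepA wt (some ([], List.foldl (pvShapeStep wt) ([], -1) vs)) i = none from rfl,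
        pvFoldA_none] at hp
      exact absurd hp (by simp)
    | cons c0 rest =>
      by_cases h : i = c0
      · subst h
        rw [List.foldl_cons, pvStepA_skip] at hp
        rw [List.foldl_cons, show pvStepB1 (i :: rest, vs) i = (rest, vs) by simp [pvStepB1]]
        exact ih rest vs p hp
      · rw [List.foldl_cons, pvStepA_valid wt i c0 rest _ h,
          show pvShapeStep wt (List.foldl (pvShapeStep wt) ([], -1) vs) i
              = List.foldl (pvShapeStep wt) ([], -1) (vs ++ [i]) by
            rw [List.foldl_append]; rfl] at hp
        rw [List.foldl_cons, show pvStepB1 (c0 :: rest, vs) i = (c0 :: rest, vs ++ [i]) by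
          simp [pvStepB1, h]]
        exact ih (c0 :: rest) (vs ++ [i]) p hp


-- A's fold returns none only when the exclude list is a strictly increasing run
-- of indices that the loop fully consumes before its last iteration
theorem pvNoneCrash (wt : Int) : ∀ (k : Nat) (n a : Int), n - a ≤ (k : Int) →
    ∀ (rem : List Int) (st : List (List Int) × Int),
    List.foldl (pvStepA wt) (some (rem, st)) (PySem.List.pyRange a n 1) = none →
    a < n ∧ rem.Pairwise (· < ·) ∧ ∀ e ∈ rem, a ≤ e ∧ e < n - 1 := by
  intro k
  induction k with
  | zero =>
    intro n a hk rem st h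
    rw [PySem.List.pyRange_one_eq_nil (by omega)] at h
    simp at h
  | succ k ih =>
    intro n a hk rem st h
    by_cases han : a < n
    · rw [PySem.List.pyRange_one_cons han, List.foldl_cons] at h
      cases rem with
      | nil =>
        refine ⟨han, List.Pairwise.nil, by simp⟩
      | cons c0 rest =>
        by_cases hic : a = c0
        · subst hic
          rw [pvStepA_skip] at h
          obtain ⟨h1, h2, h3⟩ := ih n (a + 1) (by omega) rest st h
          refine ⟨han, ?_, ?_⟩
          · exact List.Pairwise.cons (fun e he => by have := (h3 e he).1; omega) h2
          · intro e he
            rcases List.mem_cons.mp he with rfl | he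
            · omega
            · have := h3 e he; omega
        · rw [pvStepA_valid wt a c0 rest st (by simpa using hic)] at h
          obtain ⟨h1, h2, h3⟩ := ih n (a + 1) (by omega) (c0 :: rest) _ h
          refine ⟨han, h2, ?_⟩
          intro e he; have := h3 e he; omega
    · rw [PySem.List.pyRange_one_eq_nil (by omega)] at h
      simp at h

-- pass 2 split into the closed ranges plus the final (start, prev) pair
def pvGoPairs (wt : Int) : List Int → Int → Int → List (List Int) × Int × Int
  | [], start, prev => ([], start, prev)
  | v :: rest, start, prev =>
    if v - prev > wt then
      let r := pvGoPairs wt rest v v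
      ([start, prev] :: r.1, r.2)
    else pvGoPairs wt rest start v

theorem pvShapeStep_concat (wt : Int) (closed : List (List Int)) (start prev v : Int) :
    pvShapeStep wt (closed ++ [[start]], prev) v
      = (if v - prev > wt then (closed ++ [[start, prev]]) ++ [[v]] else closed ++ [[start]], v) := by
  have hne : closed ++ [[start]] ≠ [] := by simp
  simp only [pvShapeStep, if_neg hne, pvAppendLast_concat]
  split_ifs <;> simp

theorem pvShape_goPairs (wt : Int) (vs : List Int) : ∀ (closed : List (List Int)) (start prev : Int),
    List.foldl (pvShapeStep wt) (closed ++ [[start]], prev) vs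
      = ((closed ++ (pvGoPairs wt vs start prev).1) ++ [[(pvGoPairs wt vs start prev).2.1]],
         (pvGoPairs wt vs start prev).2.2) := by
  induction vs with
  | nil => intro closed start prev; simp [pvGoPairs]
  | cons v rest ih =>
    intro closed start prev
    rw [List.foldl_cons, pvShapeStep_concat]
    by_cases h : v - prev > wt
    · rw [if_pos h, ih (closed ++ [[start, prev]]) v v]
      simp [pvGoPairs, h]
    · rw [if_neg h, ih closed start v]
      simp [pvGoPairs, h]

theorem pvGo_goPairs (wt : Int) (vs : List Int) : ∀ (start prev : Int),
    pvGo wt vs start prev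
      = (pvGoPairs wt vs start prev).1
          ++ [[(pvGoPairs wt vs start prev).2.1, (pvGoPairs wt vs start prev).2.2]] := by
  induction vs with
  | nil => intro start prev; simp [pvGo, pvGoPairs]
  | cons v rest ih =>
    intro start prev
    by_cases h : v - prev > wt
    · rw [show pvGo wt (v :: rest) start prev
            = [start, prev] :: pvGo wt rest v v from by rw [pvGo, if_pos h],
          ih v v]
      simp [pvGoPairs, h]
    · rw [show pvGo wt (v :: rest) start prev
            = pvGo wt rest start v from by rw [pvGo, if_neg h],
          ih start v]
      simp [pvGoPairs, h]

theorem pvGoPairs_last (wt : Int) (vs : List Int) : ∀ (start prev : Int),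
    (pvGoPairs wt vs start prev).2.2 = vs.getLastD prev := by
  induction vs with
  | nil => intro start prev; rfl
  | cons v rest ih =>
    intro start prev
    by_cases h : v - prev > wt
    · rw [show pvGoPairs wt (v :: rest) start prev
            = ([start, prev] :: (pvGoPairs wt rest v v).1, (pvGoPairs wt rest v v).2) from by
              rw [pvGoPairs, if_pos h],
          List.getLastD_cons]
      exact ih v v
    · rw [show pvGoPairs wt (v :: rest) start prev
            = pvGoPairs wt rest start v from by rw [pvGoPairs, if_neg h],
          List.getLastD_cons]
      exact ih start v

-- the common unfolding: under Pre_, both outputs reduce to pvGoPairs data, with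
-- A closing the last range at n-1 and B at the last valid index
theorem pvMain (arr exclude_points : List Int) (window_threshold : Int)
    (hpre : Pre_complement_ends arr exclude_points window_threshold) :
    (complement_ends arr exclude_points window_threshold = [] ∧
     complement_ends_alt arr exclude_points window_threshold = [] ∧
     (PySem.List.pyRange 0 (arr.length : Int) 1).filter
       (fun i => decide (i ∉ pvConsumed (arr.length : Int) exclude_points (-1))) = []) ∨
    (∃ v rest, (PySem.List.pyRange 0 (arr.length : Int) 1).filter
       (fun i => decide (i ∉ pvConsumed (arr.length : Int) exclude_points (-1))) = v :: rest ∧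
     complement_ends arr exclude_points window_threshold
       = (pvGoPairs window_threshold rest v v).1
           ++ [[(pvGoPairs window_threshold rest v v).2.1, (arr.length : Int) - 1]] ∧
     complement_ends_alt arr exclude_points window_threshold
       = (pvGoPairs window_threshold rest v v).1
           ++ [[(pvGoPairs window_threshold rest v v).2.1, (v :: rest).getLastD 0]]) := by
  have hvalids :
      ((PySem.List.pyRange 0 (arr.length : Int) 1).foldl pvStepB1 (exclude_points, [])).2
        = (PySem.List.pyRange 0 (arr.length : Int) 1).filter
            (fun i => decide (i ∉ pvConsumed (arr.length : Int) exclude_points (-1))) := by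
    have := pvFoldB_char window_threshold (arr.length) (arr.length : Int) 0 (by simp)
      exclude_points []
    simpa using this
  cases hA : (PySem.List.pyRange 0 (arr.length : Int) 1).foldl
      (pvStepA window_threshold) (some (exclude_points, [], -1)) with
  | none =>
    exfalso
    obtain ⟨h1, h2, h3⟩ := pvNoneCrash window_threshold (arr.length) (arr.length : Int) 0
      (by simp) exclude_points ([], -1) hA
    rcases hpre with h | h
    · subst h; simp at h1
    · exact h ⟨h2, fun e he => ⟨(h3 e he).1, (h3 e he).2⟩⟩
  | some p =>
    obtain ⟨rem', st'⟩ := p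
    have hst : st' = List.foldl (pvShapeStep window_threshold) ([], -1)
        (((PySem.List.pyRange 0 (arr.length : Int) 1).foldl pvStepB1 (exclude_points, [])).2) :=
      pvFissionA window_threshold _ exclude_points [] (rem', st') hA
    rw [hvalids] at hst
    cases hF : (PySem.List.pyRange 0 (arr.length : Int) 1).filter
        (fun i => decide (i ∉ pvConsumed (arr.length : Int) exclude_points (-1))) with
    | nil =>
      left
      rw [hF] at hst
      refine ⟨?_, ?_, rfl⟩
      · unfold complement_ends
        rw [hA, hst]; rfl
      · unfold complement_ends_alt
        rw [hvalids, hF]; rfl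
    | cons v rest =>
      right
      refine ⟨v, rest, rfl, ?_, ?_⟩
      · unfold complement_ends
        rw [hA, hst, hF]
        have h1 : List.foldl (pvShapeStep window_threshold) ([], -1) (v :: rest)
            = List.foldl (pvShapeStep window_threshold) ([] ++ [[v]], v) rest := by
          simp [pvShapeStep]
        rw [h1, pvShape_goPairs]
        simp only [List.nil_append, List.getLast?_concat]
        rw [if_pos (by simp), pvAppendLast_concat]
        simp
      · unfold complement_ends_alt
        rw [hvalids, hF]
        show pvGo window_threshold rest v v = _
        rw [pvGo_goPairs, pvGoPairs_last, List.getLastD_cons]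

-- when the filter list is nonempty, its last element is n-1 iff n-1 is kept
theorem pvFilter_last (n : Int) (C : List Int) (v : Int) (rest : List Int)
    (hn : 0 < n)
    (hF : (PySem.List.pyRange 0 n 1).filter (fun i => decide (i ∉ C)) = v :: rest) :
    ((n - 1 ∉ C) → (v :: rest).getLastD 0 = n - 1) ∧
    ((n - 1 ∈ C) → (v :: rest).getLastD 0 ≠ n - 1) := by
  have hsplit : PySem.List.pyRange 0 n 1
      = PySem.List.pyRange 0 (n - 1) 1 ++ [n - 1] := by
    have := PySem.List.pyRange_one_succ_right (a := 0) (b := n - 1) (by omega)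
    simpa [sub_add_cancel] using this
  constructor
  · intro hkeep
    rw [hsplit, List.filter_append] at hF
    have : List.filter (fun i => decide (i ∉ C)) [n - 1] = [n - 1] := by
      simp [hkeep]
    rw [this] at hF
    rw [← hF, List.getLastD_eq_getLast?, List.getLast?_concat]
    rfl
  · intro hmem hEq
    have hne : v :: rest ≠ [] := by simp
    have hlast : (v :: rest).getLastD 0 ∈ v :: rest := by
      rw [List.getLastD_eq_getLast?, List.getLast?_eq_some_getLast hne]
      exact List.getLast_mem hne
    rw [hEq, ← hF] at hlast
    have hdec := List.of_mem_filter hlast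
    simp only [decide_eq_true_eq] at hdec
    exact hdec hmem

-- ===== VERDICT (by name: the statements are the Claim_ definitions above) =====
theorem complement_ends_spec : Claim_unchanged_complement_ends := by
  intro arr ep wt _ hpre hnd
  rcases pvMain arr ep wt hpre with ⟨hA, hB, _⟩ | ⟨v, rest, hF, hA, hB⟩
  · rw [hA, hB]
  · rw [hA, hB]
    have hn : 0 < (arr.length : Int) := by
      by_contra h
      rw [PySem.List.pyRange_one_eq_nil (by omega)] at hF
      simp at hF
    have hnotmem : ((arr.length : Int) - 1) ∉ pvConsumed (arr.length : Int) ep (-1) := by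
      intro hmem
      refine hnd ⟨hmem, ?_⟩
      have hvF : v ∈ (PySem.List.pyRange 0 (arr.length : Int) 1).filter
          (fun i => decide (i ∉ pvConsumed (arr.length : Int) ep (-1))) := by
        rw [hF]; exact List.mem_cons_self
      have hv_mem_range : v ∈ PySem.List.pyRange 0 (arr.length : Int) 1 :=
        List.mem_of_mem_filter hvF
      have hvnot : v ∉ pvConsumed (arr.length : Int) ep (-1) := by
        have := List.of_mem_filter hvF
        simpa using this
      have hsub : pvConsumed (arr.length : Int) ep (-1)
          ⊆ (PySem.List.pyRange 0 (arr.length : Int) 1).erase v := by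
        intro x hx
        have hb := pvConsumed_mem_bounds (arr.length : Int) ep (-1) x hx
        have hxv : x ≠ v := fun h => hvnot (h ▸ hx)
        rw [List.mem_erase_of_ne hxv]
        exact PySem.List.mem_pyRange_one.mpr ⟨by omega, hb.2⟩
      have hndp : (pvConsumed (arr.length : Int) ep (-1)).Nodup :=
        (pvConsumed_pairwise (arr.length : Int) ep (-1)).imp (fun h => ne_of_lt h)
      have hlen := (List.subperm_of_subset hndp hsub).length_le
      have hre : ((PySem.List.pyRange 0 (arr.length : Int) 1).erase v).length
          = (PySem.List.pyRange 0 (arr.length : Int) 1).length - 1 :=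
        List.length_erase_of_mem hv_mem_range
      have hrl : (PySem.List.pyRange 0 (arr.length : Int) 1).length = arr.length := by
        rw [PySem.List.length_pyRange_one]; simp
      have h1 : 1 ≤ arr.length := by
        have := PySem.List.mem_pyRange_one.mp hv_mem_range
        omega
      omega
    rw [(pvFilter_last (arr.length : Int) _ v rest hn hF).1 hnotmem]

theorem complement_ends_changed : Claim_changed_complement_ends := by
  unfold Claim_changed_complement_ends; decide

theorem complement_ends_tight : Claim_exact_complement_ends := by
  intro arr ep wt _ hpre hd
  obtain ⟨hmem, hCne⟩ := hd
  rcases pvMain arr ep wt hpre with ⟨_, _, hF⟩ | ⟨v, rest, hF, hA, hB⟩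
  · exfalso
    have hC := pvFilterNil (arr.length) (arr.length : Int) 0 (by simp) ep
      (by simpa using hF)
    have hCl : (pvConsumed (arr.length : Int) ep (-1)).length = arr.length := by
      rw [show pvConsumed (arr.length : Int) ep (-1) = PySem.List.pyRange 0 (arr.length : Int) 1
            from by simpa using hC,
          PySem.List.length_pyRange_one]
      simp
    rw [hCl] at hCne
    exact absurd hCne (lt_irrefl _)
  · rw [hA, hB]
    have hn : 0 < (arr.length : Int) := by
      by_contra h
      rw [PySem.List.pyRange_one_eq_nil (by omega)] at hF
      simp at hF
    have hne := (pvFilter_last (arr.length : Int) _ v rest hn hF).2 hmem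
    intro hEq
    have := List.append_cancel_left hEq
    simp only [List.cons.injEq] at this
    exact hne this.1.2.1.symm
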